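-- pv_equiv track=rewrite | github.com/thesofakillers/rebus | rebus.py | get_parent_word
-- ===== SOURCE A (Python) =====
-- def get_parent_word(start_idx: int, end_idx: int, candidate: str) -> str:
--     """
--     Gets the parent word that contains the substring at the given indices.
--     Returns empty string if the substring spans multiple words.
--
--     Example:
--         candidate = "hello world"
--         alpha_only = "helloworld"
--         - If start_idx=3, end_idx=5 (pointing to "lo" in alpha_only), Returns "hello"
--           since that's the original word containing those letters
--         - If start_idx=3, end_idx=8 (pointing to "lowor" in alpha_only), Returns ""
--           since the substring spans multiple words
--     """
--     words = candidate.split()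
--     current_idx = 0
--
--     for word in words:
--         word_length = len(word)
--         if current_idx <= start_idx <= end_idx <= current_idx + word_length:
--             return word
--         current_idx += word_length
--         continue  # to the next word
--
--     return ""  # Substring spans multiple words
-- ===== SOURCE B (Python) =====
-- def get_parent_word(start_idx: int, end_idx: int, candidate: str) -> str:
--     words = candidate.split()
--     # rights[i] = end offset (in the concatenation) of word i
--     rights = []
--     total = 0
--     for w in words:
--         total += len(w)
--         rights.append(total)
--     # binary search: leftmost i with rights[i] >= end_idx
--     lo, hi = 0, len(words)
--     while lo < hi:
--         mid = lo + (hi - lo) // 2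
--         if rights[mid] < end_idx:
--             lo = mid + 1
--         else:
--             hi = mid
--     if lo < len(words) and rights[lo] - len(words[lo]) <= start_idx <= end_idx:
--         return words[lo]
--     return ""
-- ===== Notes on version B (the rewrite author's own statement) =====
-- stated objective: alternative
-- what changed: Replaces A's single accumulate-and-scan loop (running offset, per-word containment test) by a precomputed table of cumulative word-end offsets plus a binary search for the leftmost word whose right boundary reaches end_idx, followed by one boundary check.
import Mathlib
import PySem

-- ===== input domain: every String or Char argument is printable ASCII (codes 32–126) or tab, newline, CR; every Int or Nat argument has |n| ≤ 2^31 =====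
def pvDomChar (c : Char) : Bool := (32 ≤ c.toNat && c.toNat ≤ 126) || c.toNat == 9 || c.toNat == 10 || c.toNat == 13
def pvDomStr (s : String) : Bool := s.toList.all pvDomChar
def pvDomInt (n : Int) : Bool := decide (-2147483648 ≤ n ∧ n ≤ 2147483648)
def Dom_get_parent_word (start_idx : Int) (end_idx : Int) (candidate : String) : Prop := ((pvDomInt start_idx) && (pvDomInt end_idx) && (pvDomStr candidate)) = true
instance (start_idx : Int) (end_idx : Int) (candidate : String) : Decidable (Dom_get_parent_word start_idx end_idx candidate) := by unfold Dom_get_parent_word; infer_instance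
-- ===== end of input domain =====

-- B replaces A's accumulate-and-scan loop by a precomputed end-offset table plus a
-- binary search for the word whose right boundary first reaches end_idx (objective:
-- alternative decomposition; same asymptotic cost, dominated by split()).

-- ===== PORT A =====
-- A's for-loop over words, carrying the running offset current_idx
def gpwLoopA (start_idx end_idx : Int) : List String → Int → String
  | [], _ => ""
  | w :: ws, cur =>
      if cur ≤ start_idx ∧ start_idx ≤ end_idx ∧ end_idx ≤ cur + PySem.Str.len w then w
      else gpwLoopA start_idx end_idx ws (cur + PySem.Str.len w)

def get_parent_word (start_idx : Int) (end_idx : Int) (candidate : String) : String :=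
  gpwLoopA start_idx end_idx (PySem.Str.split₀ candidate) 0

-- ===== PORT B =====
-- B's first loop: rights[i] = cumulative length after word i (append per iteration)
def gpwRights : List String → Int → List Int
  | [], _ => []
  | w :: ws, total => (total + PySem.Str.len w) :: gpwRights ws (total + PySem.Str.len w)

-- B's while-loop binary search; rights[mid] is always in range in B, read here with default 0 (exact on every reached state)
def gpwBisect (end_idx : Int) (rights : List Int) (lo hi : Int) : Int :=
  if _h : lo < hi then
    -- mid = lo + (hi - lo) // 2, inlined
    if PySem.List.pyGetD rights (lo + PySem.Int.floordiv (hi - lo) 2) 0 < end_idx then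
      gpwBisect end_idx rights (lo + PySem.Int.floordiv (hi - lo) 2 + 1) hi
    else gpwBisect end_idx rights lo (lo + PySem.Int.floordiv (hi - lo) 2)
  else lo
termination_by (hi - lo).toNat
decreasing_by
  all_goals
    rw [PySem.Int.floordiv_eq_ediv_of_pos (by omega : (0:Int) < 2)] at *
    omega

def get_parent_word_alt (start_idx : Int) (end_idx : Int) (candidate : String) : String :=
  let words := PySem.Str.split₀ candidate
  let rights := gpwRights words 0
  let lo := gpwBisect end_idx rights 0 (PySem.List.len words)
  if lo < PySem.List.len words then
    if PySem.List.pyGetD rights lo 0 - PySem.Str.len (PySem.List.pyGetD words lo "") ≤ start_idx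
        ∧ start_idx ≤ end_idx then
      PySem.List.pyGetD words lo ""
    else ""
  else ""

-- ===== PRECONDITION & SPEC =====
def Spec_get_parent_word (start_idx : Int) (end_idx : Int) (candidate : String) (out : String) : Prop := out = get_parent_word_alt start_idx end_idx candidate
instance (start_idx : Int) (end_idx : Int) (candidate : String) (out : String) : Decidable (Spec_get_parent_word start_idx end_idx candidate out) := by unfold Spec_get_parent_word; infer_instance

-- ===== CLAIM (what is proved, stated in full; the proofs are below) =====
def Claim_equal_get_parent_word : Prop := ∀ (start_idx : Int) (end_idx : Int) (candidate : String), Dom_get_parent_word start_idx end_idx candidate → Spec_get_parent_word start_idx end_idx candidate (get_parent_word start_idx end_idx candidate)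

-- ===== LEMMAS AND PROOFS =====

lemma gpw_len_nonneg (w : String) : 0 ≤ PySem.Str.len w := by
  simp [PySem.Str.len_eq]

-- A returns "" when start_idx > end_idx
lemma gpwLoopA_rev (s e : Int) (ws : List String) (cur : Int) (h : e < s) :
    gpwLoopA s e ws cur = "" := by
  induction ws generalizing cur with
  | nil => rfl
  | cons w ws ih =>
      rw [gpwLoopA, if_neg (by omega), ih]

-- A returns "" once the running offset has passed start_idx
lemma gpwLoopA_passed (s e : Int) (ws : List String) (cur : Int) (h : s < cur) :
    gpwLoopA s e ws cur = "" := by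
  induction ws generalizing cur with
  | nil => rfl
  | cons w ws ih =>
      have := gpw_len_nonneg w
      rw [gpwLoopA, if_neg (by omega), ih]
      omega

-- common reference: linear search for the first word whose right end reaches end_idx, then the boundary check
def gpwSpec (s e : Int) : List String → Int → String
  | [], _ => ""
  | w :: ws, cur =>
      if e ≤ cur + PySem.Str.len w then (if cur ≤ s ∧ s ≤ e then w else "")
      else gpwSpec s e ws (cur + PySem.Str.len w)

lemma gpwLoopA_eq_spec (s e : Int) (ws : List String) (cur : Int) :
    gpwLoopA s e ws cur = gpwSpec s e ws cur := by
  induction ws generalizing cur with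
  | nil => rfl
  | cons w ws ih =>
      rw [gpwLoopA, gpwSpec]
      by_cases he : e ≤ cur + PySem.Str.len w
      · rw [if_pos he]
        by_cases hc : cur ≤ s ∧ s ≤ e
        · rw [if_pos ⟨hc.1, hc.2, he⟩, if_pos hc]
        · rw [if_neg (by tauto), if_neg hc]
          rcases not_and_or.mp hc with h1 | h2
          · exact gpwLoopA_passed s e ws _ (by have := gpw_len_nonneg w; omega)
          · exact gpwLoopA_rev s e ws _ (by omega)
      · rw [if_neg (by tauto), if_neg he, ih]

lemma gpwRights_length (ws : List String) (cur : Int) :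
    (gpwRights ws cur).length = ws.length := by
  induction ws generalizing cur with
  | nil => rfl
  | cons w ws ih => simp [gpwRights, ih]

lemma gpwRights_ge (ws : List String) (cur : Int) :
    ∀ x ∈ gpwRights ws cur, cur ≤ x := by
  induction ws generalizing cur with
  | nil => simp [gpwRights]
  | cons w ws ih =>
      intro x hx
      have hl := gpw_len_nonneg w
      rcases List.mem_cons.mp hx with rfl | hx
      · omega
      · have := ih (cur + PySem.Str.len w) x hx; omega

lemma gpwRights_pairwise (ws : List String) (cur : Int) :
    List.Pairwise (· ≤ ·) (gpwRights ws cur) := by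
  induction ws generalizing cur with
  | nil => simp [gpwRights]
  | cons w ws ih =>
      refine List.Pairwise.cons ?_ (ih _)
      intro x hx
      exact gpwRights_ge ws _ x hx

-- the binary search: bounds and the two boundary facts
lemma gpwBisect_char (e : Int) (rights : List Int) :
    ∀ lo hi : Int, 0 ≤ lo → lo ≤ hi → hi ≤ rights.length →
      lo ≤ gpwBisect e rights lo hi ∧ gpwBisect e rights lo hi ≤ hi ∧
      (lo < gpwBisect e rights lo hi →
        PySem.List.pyGetD rights (gpwBisect e rights lo hi - 1) 0 < e) ∧
      (gpwBisect e rights lo hi < hi →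
        e ≤ PySem.List.pyGetD rights (gpwBisect e rights lo hi) 0) := by
  intro lo hi
  induction lo, hi using gpwBisect.induct e rights with
  | case1 lo hi h hlt ih =>
      intro h0 hle hhi
      rw [gpwBisect, dif_pos h, if_pos hlt]
      have hfd : PySem.Int.floordiv (hi - lo) 2 = (hi - lo) / 2 :=
        PySem.Int.floordiv_eq_ediv_of_pos (by omega)
      rw [hfd] at hlt ih ⊢
      have hmid : lo ≤ lo + (hi - lo) / 2 ∧ lo + (hi - lo) / 2 < hi := by omega
      have := ih (by omega) (by omega) hhi
      refine ⟨by omega, by omega, ?_, this.2.2.2⟩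
      intro hlo
      by_cases hgt : lo + (hi - lo) / 2 + 1 < gpwBisect e rights (lo + (hi - lo) / 2 + 1) hi
      · exact this.2.2.1 hgt
      · have heq : gpwBisect e rights (lo + (hi - lo) / 2 + 1) hi = lo + (hi - lo) / 2 + 1 := by
          omega
        rw [heq]
        simpa using hlt
  | case2 lo hi h hlt ih =>
      intro h0 hle hhi
      rw [gpwBisect, dif_pos h, if_neg hlt]
      have hfd : PySem.Int.floordiv (hi - lo) 2 = (hi - lo) / 2 :=
        PySem.Int.floordiv_eq_ediv_of_pos (by omega)
      rw [hfd] at hlt ih ⊢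
      have hmid : lo ≤ lo + (hi - lo) / 2 ∧ lo + (hi - lo) / 2 < hi := by omega
      have := ih h0 (by omega) (by omega)
      refine ⟨this.1, by omega, this.2.2.1, ?_⟩
      intro hlo
      by_cases hgt : gpwBisect e rights lo (lo + (hi - lo) / 2) < lo + (hi - lo) / 2
      · exact this.2.2.2 hgt
      · have heq : gpwBisect e rights lo (lo + (hi - lo) / 2) = lo + (hi - lo) / 2 := by omega
        rw [heq]
        omega
  | case3 lo hi h =>
      intro h0 hle hhi
      have : lo = hi := by omega
      rw [gpwBisect, dif_neg h]
      omega

-- linear search = indexed characterisation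
lemma gpwSpec_char (s e : Int) :
    ∀ (ws : List String) (cur : Int) (r : Int),
      0 ≤ r → r ≤ ws.length →
      (∀ j : Nat, (j : Int) < r → (gpwRights ws cur).getD j 0 < e) →
      (r < ws.length → e ≤ (gpwRights ws cur).getD r.toNat 0) →
      gpwSpec s e ws cur =
        (if r < (ws.length : Int) then
          (if (gpwRights ws cur).getD r.toNat 0 - PySem.Str.len (ws.getD r.toNat "") ≤ s ∧ s ≤ e
           then ws.getD r.toNat "" else "")
         else "") := by
  intro ws
  induction ws with
  | nil =>
      intro cur r h0 hr _ _
      rw [if_neg (by simp; simp at hr; omega)]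
      rfl
  | cons w ws ih =>
      intro cur r h0 hr H1 H2
      have hlen : ((w :: ws).length : Int) = (ws.length : Int) + 1 := by
        push_cast [List.length_cons]; ring
      rw [gpwSpec]
      by_cases hz : r = 0
      · subst hz
        have he : e ≤ cur + PySem.Str.len w := by
          have h := H2 (by omega)
          simpa only [gpwRights, Int.toNat_zero, List.getD_cons_zero] using h
        rw [if_pos he, if_pos (show (0:Int) < ((w :: ws).length : Int) by omega)]
        simp only [gpwRights, Int.toNat_zero, List.getD_cons_zero]
        have hc : (cur + PySem.Str.len w - PySem.Str.len w ≤ s ∧ s ≤ e) ↔ (cur ≤ s ∧ s ≤ e) := by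
          constructor <;> intro h <;> exact ⟨by omega, h.2⟩
        simp only [hc]
      · have hr1 : 1 ≤ r := by omega
        have hlt : cur + PySem.Str.len w < e := by
          have h := H1 0 (by omega)
          simpa only [gpwRights, List.getD_cons_zero] using h
        rw [if_neg (by omega)]
        have htn : r.toNat = (r - 1).toNat + 1 := by omega
        have key := ih (cur + PySem.Str.len w) (r - 1) (by omega) (by omega)
          (fun j hj => by
            have h := H1 (j + 1) (by push_cast; omega)
            simpa only [gpwRights, List.getD_cons_succ] using h)
          (fun hlen2 => by
            have h := H2 (by omega)
            rw [htn] at h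
            simpa only [gpwRights, List.getD_cons_succ] using h)
        rw [key]
        by_cases hcase : r - 1 < (ws.length : Int)
        · rw [if_pos hcase, if_pos (show r < ((w :: ws).length : Int) by omega)]
          simp only [gpwRights, htn, List.getD_cons_succ]
        · rw [if_neg hcase, if_neg (show ¬ r < ((w :: ws).length : Int) by omega)]

lemma gpw_getD_le (l : List Int) (h : List.Pairwise (· ≤ ·) l) (i j : Nat)
    (hij : i ≤ j) (hj : j < l.length) : l.getD i 0 ≤ l.getD j 0 := by
  rcases Nat.eq_or_lt_of_le hij with rfl | hlt
  · exact le_refl _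
  · rw [List.getD_eq_getElem l 0 (by omega), List.getD_eq_getElem l 0 hj]
    exact List.pairwise_iff_getElem.mp h i j _ _ hlt

-- ===== VERDICT (by name: the statement is the Claim_ definition above) =====
theorem get_parent_word_spec : Claim_equal_get_parent_word := by
  intro s e c _
  show get_parent_word s e c = get_parent_word_alt s e c
  rw [get_parent_word, get_parent_word_alt]
  set ws := PySem.Str.split₀ c with hws
  set rights := gpwRights ws 0 with hrights
  set r := gpwBisect e rights 0 (PySem.List.len ws) with hr
  have hlenws : PySem.List.len ws = (ws.length : Int) := by simp [PySem.List.len_eq]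
  have hlenr : rights.length = ws.length := gpwRights_length ws 0
  have hchar := gpwBisect_char e rights 0 (PySem.List.len ws) (le_refl 0)
    (by rw [hlenws]; omega) (by rw [hlenws, hlenr])
  rw [← hr] at hchar
  obtain ⟨h0r, hrhi, hleft, hright⟩ := hchar
  rw [hlenws] at hrhi hright
  have hpw := gpwRights_pairwise ws 0
  rw [← hrights] at hpw
  -- H1: everything strictly before r is < e
  have H1 : ∀ j : Nat, (j : Int) < r → rights.getD j 0 < e := by
    intro j hj
    have hlo : 0 < r := by omega
    have hlt := hleft hlo
    have hids : PySem.List.pyGetD rights (r - 1) 0 = rights.getD (r - 1).toNat 0 := by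
      rw [PySem.List.pyGetD_of_nonneg _ _ (by omega)]
    rw [hids] at hlt
    have hle : rights.getD j 0 ≤ rights.getD (r - 1).toNat 0 :=
      gpw_getD_le rights hpw j (r - 1).toNat (by omega) (by rw [hlenr]; omega)
    omega
  have H2 : r < (ws.length : Int) → e ≤ rights.getD r.toNat 0 := by
    intro hlen
    have := hright hlen
    rwa [PySem.List.pyGetD_of_nonneg _ _ h0r] at this
  rw [gpwLoopA_eq_spec, gpwSpec_char s e ws 0 r h0r (by omega) H1 (by intro h; exact H2 (by exact_mod_cast h))]
  rw [hlenws]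
  by_cases hcase : r < (ws.length : Int)
  · rw [if_pos hcase, if_pos hcase]
    rw [PySem.List.pyGetD_of_nonneg _ _ h0r, PySem.List.pyGetD_of_nonneg _ _ h0r]
  · rw [if_neg hcase, if_neg hcase]
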